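-- pv_equiv track=rewrite | github.com/mstang107/noq | solvers/utils/shapes.py | string_to_canon_shape
-- ===== SOURCE A (Python) =====
-- def string_to_canon_shape(string):
--     '''
--     Given a string representation of a shape, either
--      - using spaces and non-space characters only, e.g.
--         *
--         *
--         **
--      - or using tabs to separate the pieces, e.g.
--         *
--         *
--         *   *
--     Return the canonicalized version of the shape.
--     '''
--     width, height = 0, 0
--     cells = []
--     if '\t' in string:
--         for line in string.split('\n'):
--             if line != '':
--                 tab_parts = line.split('\t')
--                 cells.append(tab_parts)
--                 width = max(width, len(tab_parts))
--                 height += 1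
--     else:
--         for line in string.split('\n'):
--             if line != '':
--                 cells.append(list(line))
--                 width = max(width, len(line))
--                 height += 1
--     shape = []
--     for r in range(height):
--         for c in range(width):
--             try:
--                 if not cells[r][c].isspace():
--                     shape.append((r,c))
--             except IndexError:
--                 pass
--     return canonicalize_shape(shape)
--
-- def canonicalize_shape(shape):
--     '''
--     Given a (possibly non-canonical) shape representation,
--
--     Return the canonical representation of the shape, a tuple:
--         - in sorted order
--         - whose first element is (0, 0)
--         - whose other elements represent the offsets of
--         the other cells from the first one
--     '''
--     shape = sorted(shape)
--     root_y, root_x = shape[0]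
--     dy, dx = -1*root_y, -1*root_x
--     return tuple((y+dy, x+dx) for y, x in shape)
-- ===== SOURCE B (Python) =====
-- def string_to_canon_shape(string):
--     # Single pass over the lines: no cells grid, no width/height bookkeeping,
--     # no try/except -- each non-empty line contributes its own (r, c) pairs directly.
--     tabbed = '\t' in string
--     shape = []
--     r = 0
--     for line in string.split('\n'):
--         if line == '':
--             continue
--         elems = line.split('\t') if tabbed else line
--         for c, e in enumerate(elems):
--             if not e.isspace():
--                 shape.append((r, c))
--         r += 1
--     cells = sorted(shape)
--     y0, x0 = cells[0]
--     return tuple((y - y0, x - x0) for y, x in cells)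
-- ===== Notes on version B (the rewrite author's own statement) =====
-- stated objective: simpler
-- what changed: B fuses A's two phases (build a cells grid with width/height bookkeeping, then rescan the full width x height rectangle with try/except around out-of-range indexing) into a single pass that emits (r, c) pairs directly per non-empty line and canonicalizes inline.
import Mathlib
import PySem

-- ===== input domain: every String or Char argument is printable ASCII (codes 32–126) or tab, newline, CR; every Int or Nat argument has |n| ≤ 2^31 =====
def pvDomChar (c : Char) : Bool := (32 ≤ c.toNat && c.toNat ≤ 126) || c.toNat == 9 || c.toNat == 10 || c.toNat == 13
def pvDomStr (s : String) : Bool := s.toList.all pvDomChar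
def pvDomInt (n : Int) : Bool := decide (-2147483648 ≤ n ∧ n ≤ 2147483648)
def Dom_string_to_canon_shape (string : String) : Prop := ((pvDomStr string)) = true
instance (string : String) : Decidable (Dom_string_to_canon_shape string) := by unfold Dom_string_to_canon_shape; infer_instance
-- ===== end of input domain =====

-- B fuses A's two phases (grid building + width×height rescan with try/except) into one
-- pass that emits (r, c) pairs per non-empty line directly; return-value equivalence only.

-- ===== PORT A =====
-- helper canonicalize_shape: Python raises IndexError on an empty shape; those inputs are
-- excluded by Pre_, the [] branch is only to make the port total.
def canonicalize_shape (shape : List (Int × Int)) : List (Int × Int) :=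
  let s := PySem.List.sorted2 shape (·.1) (·.2)
  match s with
  | [] => []
  | (ry, rx) :: _ => s.map (fun p => (p.1 - ry, p.2 - rx))

def string_to_canon_shape (string : String) : List (Int × Int) :=
  let lines := PySem.Chars.splitOn string.toList ['\n']
  let st :=
    if PySem.Str.isIn "\t" string then
      lines.foldl (fun (st : List (List (List Char)) × Nat × Nat) line =>
        if line ≠ [] then
          let tab_parts := PySem.Chars.splitOn line ['\t']
          (st.1 ++ [tab_parts], max st.2.1 tab_parts.length, st.2.2 + 1)
        else st) ([], 0, 0)
    else
      lines.foldl (fun (st : List (List (List Char)) × Nat × Nat) line =>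
        if line ≠ [] then
          (st.1 ++ [line.map (fun c => [c])], max st.2.1 line.length, st.2.2 + 1)
        else st) ([], 0, 0)
  let shape := (List.range st.2.2).foldl (fun sh r =>
      (List.range st.2.1).foldl (fun sh c =>
        match st.1[r]? >>= fun row => row[c]? with      -- try: … except IndexError: pass
        | none => sh
        | some e => if !PySem.Chars.strIsspace e then sh ++ [((r : Int), (c : Int))] else sh) sh) []
  canonicalize_shape shape

-- ===== PORT B =====
def rowPairs (r : Int) (elems : List (List Char)) : List (Int × Int) :=
  (PySem.List.enumerate elems).foldl
    (fun acc ce => if !PySem.Chars.strIsspace ce.2 then acc ++ [(r, ce.1)] else acc) []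

def string_to_canon_shape_alt (string : String) : List (Int × Int) :=
  let tabbed := PySem.Str.isIn "\t" string
  let res := (PySem.Chars.splitOn string.toList ['\n']).foldl
    (fun (st : Int × List (Int × Int)) line =>
      if line = [] then st
      else
        let elems := if tabbed then PySem.Chars.splitOn line ['\t'] else line.map (fun c => [c])
        (st.1 + 1, st.2 ++ rowPairs st.1 elems)) (0, [])
  let cs := PySem.List.sorted2 res.2 (·.1) (·.2)
  match cs with
  | [] => []                                            -- Python raises here; excluded by Pre_
  | (y0, x0) :: _ => cs.map (fun p => (p.1 - y0, p.2 - x0))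

-- ===== PRECONDITION & SPEC =====
-- Pre_ excludes exactly the whitespace-only inputs on which Python A (and B) raise
-- IndexError in canonicalize_shape (the shape list comes out empty there).
def Pre_string_to_canon_shape (string : String) : Prop :=
  if PySem.Str.isIn "\t" string then
    ((PySem.Chars.splitOn string.toList ['\n']).any (fun line =>
      !line.isEmpty && (PySem.Chars.splitOn line ['\t']).any
        (fun part => !PySem.Chars.strIsspace part))) = true
  else
    (string.toList.any (fun c => !PySem.Chars.isspace c)) = true
instance (string : String) : Decidable (Pre_string_to_canon_shape string) := by
  unfold Pre_string_to_canon_shape; infer_instance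

def pvWitness_string_to_canon_shape : String := "*\n**"

def Spec_string_to_canon_shape (string : String) (out : List (Int × Int)) : Prop := out = string_to_canon_shape_alt string
instance (string : String) (out : List (Int × Int)) : Decidable (Spec_string_to_canon_shape string out) := by unfold Spec_string_to_canon_shape; infer_instance

-- ===== CLAIM (what is proved, stated in full; the proofs are below) =====
def Claim_equal_string_to_canon_shape : Prop := ∀ (string : String), Dom_string_to_canon_shape string → Pre_string_to_canon_shape string → Spec_string_to_canon_shape string (string_to_canon_shape string)

-- ===== LEMMAS AND PROOFS =====

-- the (r, c) pairs a single row contributes, as filter/map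
def RP (r : Int) (row : List (List Char)) : List (Int × Int) :=
  ((PySem.List.enumerate row).filter (fun ce => !PySem.Chars.strIsspace ce.2)).map
    (fun ce => (r, ce.1))

theorem rowPairs_eq (r : Int) (row : List (List Char)) : rowPairs r row = RP r row :=
  PySem.List.foldl_append_if _ _ _ _

-- the pairs of a list of rows starting at row index r
def rowsPairs (r : Int) (rows : List (List (List Char))) : List (Int × Int) :=
  match rows with
  | [] => []
  | row :: rest => RP r row ++ rowsPairs (r + 1) rest

theorem rowsPairs_append (r : Int) (xs : List (List (List Char))) (y : List (List Char)) :
    rowsPairs r (xs ++ [y]) = rowsPairs r xs ++ RP (r + xs.length) y := by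
  induction xs generalizing r with
  | nil => simp [rowsPairs]
  | cons x xs ih =>
      simp only [List.cons_append, rowsPairs, ih, List.append_assoc, List.length_cons]
      congr 3
      push_cast
      ring

theorem RP_append (r : Int) (row : List (List Char)) (e : List Char) :
    RP r (row ++ [e]) = RP r row ++
      (if !PySem.Chars.strIsspace e then [(r, (row.length : Int))] else []) := by
  simp only [RP, PySem.List.enumerate_append, List.filter_append, List.map_append]
  congr 1
  cases h : PySem.Chars.strIsspace e <;>
    simp [PySem.List.enumerate_cons, PySem.List.enumerate_nil, h]

-- A's first loop, both branches at once
theorem phase1_eq (rowOf : List Char → List (List Char)) (len : List Char → Nat)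
    (hlen : ∀ l, len l = (rowOf l).length) :
    ∀ (lines : List (List Char)) (cs : List (List (List Char))) (w h : Nat),
    lines.foldl (fun st line =>
        if line ≠ [] then (st.1 ++ [rowOf line], max st.2.1 (len line), st.2.2 + 1) else st)
      (cs, w, h)
    = (cs ++ ((lines.filter (fun l => !l.isEmpty)).map rowOf),
       ((lines.filter (fun l => !l.isEmpty)).map rowOf).foldl (fun a row => max a row.length) w,
       h + ((lines.filter (fun l => !l.isEmpty)).map rowOf).length) := by
  intro lines
  induction lines with
  | nil => intro cs w h; simp
  | cons line rest ih =>
      intro cs w h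
      simp only [List.foldl_cons]
      by_cases he : line = []
      · rw [if_neg (fun hn => hn he), ih]
        simp [he]
      · rw [if_pos he, ih]
        have hne : line.isEmpty = false := by simp [he]
        simp [hne, hlen, Nat.add_comm, Nat.add_assoc]

-- A's inner loop over one existing row, width at least the row length
theorem inner_eq (r : Nat) (row : List (List Char)) :
    ∀ (width : Nat), row.length ≤ width → ∀ (sh : List (Int × Int)),
    (List.range width).foldl (fun sh c =>
        match row[c]? with
        | none => sh
        | some e => if !PySem.Chars.strIsspace e then sh ++ [((r : Int), (c : Int))] else sh) sh
    = sh ++ RP (r : Int) row := by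
  -- first reduce width to row.length, then reverse induction on the row
  have base : ∀ (row : List (List Char)) (sh : List (Int × Int)),
      (List.range row.length).foldl (fun sh c =>
          match row[c]? with
          | none => sh
          | some e => if !PySem.Chars.strIsspace e then sh ++ [((r : Int), (c : Int))] else sh) sh
      = sh ++ RP (r : Int) row := by
    intro row
    induction row using List.reverseRecOn with
    | nil => intro sh; simp [RP, PySem.List.enumerate]
    | append_singleton row e ih =>
        intro sh
        have hlen : (row ++ [e]).length = row.length + 1 := by simp
        rw [hlen, List.range_succ, List.foldl_append]
        have hcongr : (List.range row.length).foldl (fun sh c =>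
            match (row ++ [e])[c]? with
            | none => sh
            | some x => if !PySem.Chars.strIsspace x then sh ++ [((r : Int), (c : Int))] else sh) sh
            = sh ++ RP (r : Int) row := by
          rw [PySem.List.foldl_congr_mem _ _ (fun sh c =>
            match row[c]? with
            | none => sh
            | some x => if !PySem.Chars.strIsspace x then sh ++ [((r : Int), (c : Int))] else sh) _ ?_]
          · exact ih sh
          · intro acc c hc
            have : c < row.length := List.mem_range.mp hc
            rw [List.getElem?_append_left this]
        rw [hcongr]
        have hget : (row ++ [e])[row.length]? = some e := by
          simp
        rw [List.foldl_cons, List.foldl_nil, hget, RP_append]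
        cases h : PySem.Chars.strIsspace e <;> simp [h, List.append_assoc]
  intro width hw
  induction width with
  | zero =>
      intro sh
      have hr : row = [] := List.eq_nil_of_length_eq_zero (Nat.le_zero.mp hw)
      subst hr
      simp [RP, PySem.List.enumerate_nil]
  | succ w ih =>
      intro sh
      by_cases heq : row.length = w + 1
      · rw [← heq]; exact base row sh
      · rw [List.range_succ, List.foldl_append]
        have hnone : row[w]? = none := by
          rw [List.getElem?_eq_none]
          omega
        rw [List.foldl_cons, List.foldl_nil, hnone]
        exact ih (by omega) sh

theorem bind_some_eq {α β : Type} (a : α) (f : α → Option β) : (some a >>= f) = f a := rfl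

-- A's nested range loop = rowsPairs, given the width bound
theorem outer_eq :
    ∀ (cells : List (List (List Char))) (width : Nat),
    (∀ row ∈ cells, row.length ≤ width) → ∀ (sh : List (Int × Int)),
    (List.range cells.length).foldl (fun sh r =>
        (List.range width).foldl (fun sh c =>
          match cells[r]? >>= fun row => row[c]? with
          | none => sh
          | some e => if !PySem.Chars.strIsspace e then sh ++ [((r : Int), (c : Int))] else sh) sh) sh
    = sh ++ rowsPairs 0 cells := by
  intro cells
  induction cells using List.reverseRecOn with
  | nil => intro width _ sh; simp [rowsPairs]
  | append_singleton cells row ih =>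
      intro width hw sh
      have hlen : (cells ++ [row]).length = cells.length + 1 := by simp
      rw [hlen, List.range_succ, List.foldl_append]
      have hpre : (List.range cells.length).foldl (fun sh r =>
          (List.range width).foldl (fun sh c =>
            match (cells ++ [row])[r]? >>= fun row => row[c]? with
            | none => sh
            | some e => if !PySem.Chars.strIsspace e then sh ++ [((r : Int), (c : Int))] else sh) sh) sh
          = sh ++ rowsPairs 0 cells := by
        rw [PySem.List.foldl_congr_mem _ _ (fun sh r =>
          (List.range width).foldl (fun sh c =>
            match cells[r]? >>= fun row => row[c]? with
            | none => sh
            | some e => if !PySem.Chars.strIsspace e then sh ++ [((r : Int), (c : Int))] else sh) sh) _ ?_]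
        · exact ih width (fun r hr => hw r (List.mem_append_left _ hr)) sh
        · intro acc r hr
          have : r < cells.length := List.mem_range.mp hr
          rw [List.getElem?_append_left this]
      rw [hpre]
      have hget : (cells ++ [row])[cells.length]? = some row := by simp
      rw [List.foldl_cons, List.foldl_nil]
      simp only [hget, bind_some_eq]
      rw [inner_eq cells.length row width (hw row (by simp)) _]
      have : rowsPairs 0 (cells ++ [row]) = rowsPairs 0 cells ++ RP (cells.length : Int) row := by
        simpa using rowsPairs_append 0 cells row
      rw [this, List.append_assoc]

-- B's single loop = rowsPairs of the filtered rows
theorem phaseB_eq (rowOf : List Char → List (List Char)) :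
    ∀ (lines : List (List Char)) (r : Int) (acc : List (Int × Int)),
    lines.foldl (fun (st : Int × List (Int × Int)) line =>
        if line = [] then st else (st.1 + 1, st.2 ++ rowPairs st.1 (rowOf line))) (r, acc)
    = (r + ((lines.filter (fun l => !l.isEmpty)).length : Int),
       acc ++ rowsPairs r ((lines.filter (fun l => !l.isEmpty)).map rowOf)) := by
  intro lines
  induction lines with
  | nil => intro r acc; simp [rowsPairs]
  | cons line rest ih =>
      intro r acc
      simp only [List.foldl_cons]
      by_cases he : line = []
      · rw [if_pos he, ih]
        simp [he]
      · rw [if_neg he, ih]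
        have hne : line.isEmpty = false := by simp [he]
        simp only [List.filter_cons, hne, Bool.not_false, if_pos, List.length_cons,
          List.map_cons, rowsPairs, rowPairs_eq, Prod.mk.injEq]
        refine ⟨by push_cast; ring, by simp [List.append_assoc]⟩

-- the two ports, reduced to the same closed form
theorem ports_agree (string : String) :
    string_to_canon_shape string = string_to_canon_shape_alt string := by
  unfold string_to_canon_shape string_to_canon_shape_alt
  by_cases ht : PySem.Str.isIn "\t" string = true
  · simp only [ht, if_pos]

    rw [phase1_eq (fun line => PySem.Chars.splitOn line ['\t'])
          (fun line => (PySem.Chars.splitOn line ['\t']).length) (fun _ => rfl),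
        phaseB_eq (fun line => PySem.Chars.splitOn line ['\t'])]
    simp only [List.nil_append, Nat.zero_add]
    rw [outer_eq _ _ ?_ []]
    · rfl
    · intro row hrow
      exact (PySem.List.le_foldl_max_nat _ List.length 0).2 _ hrow
  · simp only [ht, if_neg, Bool.false_eq_true, not_false_iff]

    rw [phase1_eq (fun line => line.map (fun c => [c])) (fun line => line.length)
          (fun l => by simp),
        phaseB_eq (fun line => line.map (fun c => [c]))]
    simp only [List.nil_append, Nat.zero_add]
    rw [outer_eq _ _ ?_ []]
    · rfl
    · intro row hrow
      exact (PySem.List.le_foldl_max_nat _ List.length 0).2 _ hrow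

-- ===== VERDICT (by name: the statement is the Claim_ definition above) =====
theorem string_to_canon_shape_spec : Claim_equal_string_to_canon_shape := by
  intro string _ _
  unfold Spec_string_to_canon_shape
  exact ports_agree string
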